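-- pv_equiv track=rewrite | github.com/kareekij/sampling-robustness | adversary_sample_zero_check.py | _getCommunity
-- ===== SOURCE A (Python) =====
-- def _getCommunity(partition):
--     com = {}
--
--     for n in partition:
--         p = partition[n]
--         if p not in com:
--             com[p] = set()
--         com[p].update(set([n]))
--
--     com = {c: com[c] for c in com if len(com[c]) > 1}
--
--     # Make sure we do not consider the singleton nodes
--     return com
-- ===== SOURCE B (Python) =====
-- def _getCommunity(partition):
--     # Declarative per-community scan: list each distinct community (first-appearance
--     # order), gather its members with a fresh scan of the nodes, keep the non-singletons.
--     groups = {c: {n for n in partition if partition[n] == c}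
--               for c in dict.fromkeys(partition.values())}
--     return {c: s for c, s in groups.items() if len(s) > 1}
-- ===== Notes on version B (the rewrite author's own statement) =====
-- stated objective: alternative
-- what changed: B replaces A's single-pass grouping accumulator (dict of sets grown node by node) with a brute-force per-community scan: it lists the distinct communities, rebuilds each community's member set by one comprehension scan over all nodes, and keeps the non-singletons; it trades A's O(n) pass for an O(n*k) declarative formulation.
import Mathlib
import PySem

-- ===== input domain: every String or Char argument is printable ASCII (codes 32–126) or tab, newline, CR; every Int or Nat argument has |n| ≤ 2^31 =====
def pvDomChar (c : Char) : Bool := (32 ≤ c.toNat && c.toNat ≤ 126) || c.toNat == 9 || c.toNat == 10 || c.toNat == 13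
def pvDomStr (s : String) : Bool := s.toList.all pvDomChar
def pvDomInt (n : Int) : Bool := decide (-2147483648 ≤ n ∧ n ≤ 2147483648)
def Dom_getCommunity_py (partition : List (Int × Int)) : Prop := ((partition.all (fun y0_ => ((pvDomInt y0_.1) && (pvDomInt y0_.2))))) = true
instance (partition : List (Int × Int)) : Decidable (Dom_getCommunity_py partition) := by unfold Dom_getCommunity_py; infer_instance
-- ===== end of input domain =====

-- B lists the distinct communities and rebuilds each one by a fresh per-community scan of all
-- nodes, keeping the non-singletons — instead of A's single-pass grouping accumulator (alternative).

-- ===== PORT A =====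
def getCommunity_py (partition : List (Int × Int)) : List (Int × List Int) :=
  let d := PySem.Dict.ofList partition
  -- for n in partition: p = partition[n]; if p not in com: com[p] = set(); com[p].update({n})
  let com : PySem.Dict Int (PySem.Set Int) :=
    d.keys.foldl (fun com n =>
      let p := d.getD n 0        -- p = partition[n]; n ranges over d's keys, so the lookup succeeds
      let com := if com.contains p then com else com.insert p PySem.Set.empty
      com.insert p (PySem.Set.add (com.getD p PySem.Set.empty) n))
      PySem.Dict.empty
  -- com = {c: com[c] for c in com if len(com[c]) > 1}
  (com.keys.foldl (fun acc c =>
      if 1 < (com.getD c PySem.Set.empty).length then acc.insert c (com.getD c PySem.Set.empty)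
      else acc) PySem.Dict.empty).items

-- ===== PORT B =====
def getCommunity_py_alt (partition : List (Int × Int)) : List (Int × List Int) :=
  let d := PySem.Dict.ofList partition
  -- groups = {c: {n for n in partition if partition[n] == c} for c in dict.fromkeys(partition.values())}
  -- (dict.fromkeys = the distinct values in first-appearance order = PySem.Set.ofList;
  --  the inner set comprehension scans the keys, which are distinct, so it is a filter)
  let groups : PySem.Dict Int (PySem.Set Int) :=
    (PySem.Set.ofList d.values).foldl
      (fun acc c => acc.insert c (d.keys.filter (fun n => d.getD n 0 == c)))
      PySem.Dict.empty
  -- return {c: s for c, s in groups.items() if len(s) > 1}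
  (groups.items.foldl (fun acc cs =>
      if 1 < cs.2.length then acc.insert cs.1 cs.2 else acc) PySem.Dict.empty).items

-- ===== PRECONDITION & SPEC =====
def Spec_getCommunity_py (partition : List (Int × Int)) (out : List (Int × List Int)) : Prop := out = getCommunity_py_alt partition
instance (partition : List (Int × Int)) (out : List (Int × List Int)) : Decidable (Spec_getCommunity_py partition out) := by unfold Spec_getCommunity_py; infer_instance

-- ===== CLAIM (what is proved, stated in full; the proofs are below) =====
def Claim_equal_getCommunity_py : Prop := ∀ (partition : List (Int × Int)), Dom_getCommunity_py partition → Spec_getCommunity_py partition (getCommunity_py partition)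

-- ===== LEMMAS AND PROOFS =====

def pvStep (com : PySem.Dict Int (PySem.Set Int)) (np : Int × Int) : PySem.Dict Int (PySem.Set Int) :=
  com.modify np.2 PySem.Set.empty (fun s => PySem.Set.add s np.1)

def pvGroup (L : List (Int × Int)) : PySem.Dict Int (PySem.Set Int) :=
  L.foldl pvStep PySem.Dict.empty

def pvGset (L : List (Int × Int)) (c : Int) : List Int :=
  (L.filter (fun np => np.2 == c)).map Prod.fst

theorem pvStep_eq (com : PySem.Dict Int (PySem.Set Int)) (n p : Int) :
    (let com' := if com.contains p then com else com.insert p PySem.Set.empty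
     com'.insert p (PySem.Set.add (com'.getD p PySem.Set.empty) n))
      = pvStep com (n, p) := by
  show (if com.contains p then com else com.insert p PySem.Set.empty).insert p _ = _
  by_cases h : com.contains p = true
  · rw [if_pos h]; rfl
  · rw [if_neg (by simp [h])]
    rw [PySem.Dict.getD_insert_self, PySem.Dict.insert_insert_self]
    show _ = com.insert p (PySem.Set.add (com.getD p PySem.Set.empty) n)
    rw [show com.getD p PySem.Set.empty = PySem.Set.empty from
          PySem.Dict.getD_of_not_contains com PySem.Set.empty (by simpa using h)]

theorem pvGroup_keys (L : List (Int × Int)) :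
    (pvGroup L).keys = PySem.Set.ofList (L.map Prod.snd) := by
  calc (pvGroup L).keys
      = PySem.Set.update PySem.Dict.empty.keys (L.map (fun np => np.2)) :=
        PySem.Dict.keys_foldl_modify_key L (fun np => np.2) PySem.Set.empty
          (fun _ np s => PySem.Set.add s np.1) PySem.Dict.empty
    _ = PySem.Set.ofList (L.map Prod.snd) := PySem.Set.update_nil_left _

theorem pvGset_append (L : List (Int × Int)) (n p c : Int) :
    pvGset (L ++ [(n, p)]) c = pvGset L c ++ if p = c then [n] else [] := by
  by_cases h : p = c
  · simp [pvGset, List.filter_append, h]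
  · simp [pvGset, List.filter_append, h]

theorem pvGset_subset (L : List (Int × Int)) (c x : Int) (hx : x ∈ pvGset L c) :
    x ∈ L.map Prod.fst := by
  simp only [pvGset, List.mem_map] at hx
  obtain ⟨np, hnp, rfl⟩ := hx
  exact List.mem_map_of_mem (List.mem_of_mem_filter hnp)

theorem pvGset_nil (L : List (Int × Int)) (c : Int) (hc : c ∉ L.map Prod.snd) :
    pvGset L c = [] := by
  unfold pvGset
  rw [List.filter_eq_nil_iff.mpr, List.map_nil]
  intro np hnp hbeq
  simp only [beq_iff_eq] at hbeq
  exact hc (hbeq ▸ List.mem_map_of_mem (f := Prod.snd) hnp)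

theorem pvGroup_items (L : List (Int × Int)) (hnd : (L.map Prod.fst).Nodup) :
    (pvGroup L).items = (PySem.Set.ofList (L.map Prod.snd)).map (fun c => (c, pvGset L c)) := by
  induction L using List.reverseRecOn with
  | nil => rfl
  | append_singleton L x ih =>
    obtain ⟨n, p⟩ := x
    simp only [List.map_append, List.map_cons, List.map_nil] at hnd ⊢
    have hnd' : (L.map Prod.fst).Nodup := hnd.sublist (List.sublist_append_left _ _)
    have hn : n ∉ L.map Prod.fst := fun hmem =>
      (List.disjoint_of_nodup_append hnd) hmem (by simp)
    have ih' := ih hnd'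
    have hG : pvGroup (L ++ [(n, p)])
        = (pvGroup L).insert p (PySem.Set.add ((pvGroup L).getD p PySem.Set.empty) n) := by
      rw [pvGroup, List.foldl_append]; rfl
    have hknd : (pvGroup L).keys.Nodup := by
      rw [pvGroup_keys]; exact PySem.Set.nodup_ofList _
    rw [hG, PySem.Set.ofList_append_singleton]
    by_cases hp : p ∈ L.map Prod.snd
    · have hcont : (pvGroup L).contains p = true :=
        (PySem.Dict.contains_iff_mem_keys _ _).mpr (by rw [pvGroup_keys]; exact (PySem.Set.mem_ofList _ _).mpr hp)
      have hmemitems : (p, pvGset L p) ∈ (pvGroup L).items := by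
        rw [ih']; exact List.mem_map_of_mem ((PySem.Set.mem_ofList _ _).mpr hp)
      have hgetD : (pvGroup L).getD p PySem.Set.empty = pvGset L p :=
        PySem.Dict.getD_of_mem_items _ hmemitems hknd _
      have hadd : PySem.Set.add (pvGset L p) n = pvGset L p ++ [n] :=
        PySem.Set.add_of_not_mem (fun hx => hn (pvGset_subset L p n hx))
      rw [PySem.Dict.items_insert_of_contains _ _ hcont, hgetD, hadd, ih',
        PySem.Set.add_of_mem ((PySem.Set.mem_ofList _ _).mpr hp), List.map_map]
      refine List.map_congr_left (fun c hc => ?_)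
      by_cases hcp : c = p
      · subst hcp; simp [pvGset_append]
      · have hpc : ¬ p = c := fun h => hcp h.symm
        have hb : (c == p) = false := by simp [hcp]
        simp only [Function.comp_apply, hb, Bool.false_eq_true, if_false,
          pvGset_append, if_neg hpc, List.append_nil]
    · have hcont : (pvGroup L).contains p = false := by
        rw [← Bool.not_eq_true, PySem.Dict.contains_iff_mem_keys _ _, pvGroup_keys]
        exact fun h => hp ((PySem.Set.mem_ofList _ _).mp h)
      have hgetD : (pvGroup L).getD p PySem.Set.empty = PySem.Set.empty :=
        PySem.Dict.getD_of_not_contains _ _ hcont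
      rw [PySem.Dict.items_insert_of_not_contains _ _ hcont, hgetD, ih',
        PySem.Set.add_of_not_mem (fun h => hp ((PySem.Set.mem_ofList _ _).mp h)), List.map_append]
      congr 1
      · refine List.map_congr_left (fun c hc => ?_)
        have hcp : p ≠ c := fun h => hp (h ▸ (PySem.Set.mem_ofList _ _).mp hc)
        simp [pvGset_append, hcp]
      · simp only [List.map_cons, List.map_nil, pvGset_append, pvGset_nil L p hp,
          List.nil_append]
        rfl

theorem pvComprehension (com : PySem.Dict Int (PySem.Set Int)) (hnd : com.keys.Nodup) :
    ((com.keys.foldl (fun acc c =>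
        if 1 < (com.getD c PySem.Set.empty).length then acc.insert c (com.getD c PySem.Set.empty)
        else acc) PySem.Dict.empty).items)
      = com.items.filter (fun cv => 1 < cv.2.length) := by
  have hf : (fun (acc : PySem.Dict Int (PySem.Set Int)) (c : Int) =>
        if 1 < (com.getD c PySem.Set.empty).length then acc.insert c (com.getD c PySem.Set.empty)
        else acc)
      = (fun acc c =>
        if (fun c => decide (1 < (com.getD c PySem.Set.empty).length)) c = true
        then acc.insert c (com.getD c PySem.Set.empty) else acc) := by
    funext acc c; simp
  rw [hf, ← List.foldl_filter]
  have h2 : (List.foldl (fun (acc : PySem.Dict Int (PySem.Set Int)) c =>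
        acc.insert c (com.getD c PySem.Set.empty)) PySem.Dict.empty
        (com.keys.filter (fun c => decide (1 < (com.getD c PySem.Set.empty).length)))).items
      = PySem.Dict.empty.items
        ++ (com.keys.filter (fun c => decide (1 < (com.getD c PySem.Set.empty).length))).map
            (fun c => (c, com.getD c PySem.Set.empty)) :=
    PySem.Dict.items_foldl_insert_fresh _ (k := fun c => c)
      (v := fun c => com.getD c PySem.Set.empty) _
      (fun a _ => PySem.Dict.contains_empty a) (by simpa using hnd.filter _)
  rw [h2]
  rw [PySem.Dict.items_eq_map_keys com hnd PySem.Set.empty, List.filter_map]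
  simp only [Function.comp_def]
  exact List.nil_append _

-- B's final dict comprehension over the items of a dict with distinct keys is a plain filter.
theorem pvFilterPass (X : List (Int × PySem.Set Int)) (hnd : (X.map Prod.fst).Nodup) :
    ((X.foldl (fun acc cs =>
        if 1 < cs.2.length then acc.insert cs.1 cs.2 else acc)
        (PySem.Dict.empty : PySem.Dict Int (PySem.Set Int))).items)
      = X.filter (fun cs => 1 < cs.2.length) := by
  have hf : (fun (acc : PySem.Dict Int (PySem.Set Int)) (cs : Int × PySem.Set Int) =>
        if 1 < cs.2.length then acc.insert cs.1 cs.2 else acc)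
      = (fun acc cs =>
        if (fun cs : Int × PySem.Set Int => decide (1 < cs.2.length)) cs = true
        then acc.insert cs.1 cs.2 else acc) := by
    funext acc cs; simp
  rw [hf, ← List.foldl_filter]
  have h2 : (List.foldl (fun (acc : PySem.Dict Int (PySem.Set Int)) cs =>
        acc.insert cs.1 cs.2) PySem.Dict.empty
        (X.filter (fun cs => decide (1 < cs.2.length)))).items
      = PySem.Dict.empty.items
        ++ (X.filter (fun cs => decide (1 < cs.2.length))).map (fun cs => (cs.1, cs.2)) :=
    PySem.Dict.items_foldl_insert_fresh _ (k := Prod.fst) (v := Prod.snd) _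
      (fun a _ => PySem.Dict.contains_empty a.1)
      (hnd.sublist (List.Sublist.map Prod.fst List.filter_sublist))
  rw [h2, show (PySem.Dict.empty : PySem.Dict Int (PySem.Set Int)).items = [] from rfl,
    List.nil_append]
  simp

-- ===== VERDICT (by name: the statement is the Claim_ definition above) =====
theorem getCommunity_py_spec : Claim_equal_getCommunity_py := by
  intro partition _
  show getCommunity_py partition = getCommunity_py_alt partition
  simp only [getCommunity_py, getCommunity_py_alt]
  set d := (PySem.Dict.ofList partition : PySem.Dict Int Int) with hd
  set L := d.items with hL
  have hknd0 : d.keys.Nodup := PySem.Dict.nodup_keys_ofList partition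
  have hnd : (L.map Prod.fst).Nodup := hknd0
  -- A's grouping loop is pvGroup over the items
  have hA : d.keys.foldl
        (fun com n =>
          let p := d.getD n 0
          let com := if com.contains p then com else com.insert p PySem.Set.empty
          com.insert p (PySem.Set.add (com.getD p PySem.Set.empty) n))
        PySem.Dict.empty
      = pvGroup L := by
    show (L.map Prod.fst).foldl _ _ = _
    rw [List.foldl_map, pvGroup]
    refine PySem.List.foldl_congr_mem _ _ _ _ (fun com np hm => ?_)
    have hg : d.getD np.1 0 = np.2 :=
      PySem.Dict.getD_of_mem_items _ (by simpa using hm) hknd0 0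
    show (let p := d.getD np.1 0
          let com := if com.contains p then com else com.insert p PySem.Set.empty
          com.insert p (PySem.Set.add (com.getD p PySem.Set.empty) np.1)) = pvStep com np
    rw [show (let p := d.getD np.1 0
          let com := if com.contains p then com else com.insert p PySem.Set.empty
          com.insert p (PySem.Set.add (com.getD p PySem.Set.empty) np.1))
        = (let com := if com.contains np.2 then com else com.insert np.2 PySem.Set.empty
          com.insert np.2 (PySem.Set.add (com.getD np.2 PySem.Set.empty) np.1)) from by rw [hg]]
    exact (pvStep_eq com np.1 np.2).trans (by rw [Prod.mk.eta])
  rw [hA]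
  have hknd : (pvGroup L).keys.Nodup := by
    rw [pvGroup_keys]; exact PySem.Set.nodup_ofList _
  rw [pvComprehension _ hknd, pvGroup_items L hnd]
  -- B side: the per-community scans over the keys are exactly pvGset
  have hvals : d.values = L.map Prod.snd := rfl
  have hB : (PySem.Set.ofList d.values).foldl
        (fun acc c => acc.insert c (d.keys.filter (fun n => d.getD n 0 == c)))
        (PySem.Dict.empty : PySem.Dict Int (PySem.Set Int))
      = (PySem.Set.ofList (L.map Prod.snd)).foldl
          (fun acc c => acc.insert c (pvGset L c)) PySem.Dict.empty := by
    rw [hvals]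
    refine PySem.List.foldl_congr_mem _ _ _ _ (fun acc c _ => ?_)
    congr 1
    show (L.map Prod.fst).filter (fun n => d.getD n 0 == c) = pvGset L c
    rw [List.filter_map, pvGset]
    refine congrArg (List.map Prod.fst) (List.filter_congr (fun np hnp => ?_))
    have hg : d.getD np.1 0 = np.2 :=
      PySem.Dict.getD_of_mem_items _ (by simpa using hnp) hknd0 0
    simp [Function.comp, hg]
  rw [hB]
  have hBitems : ((PySem.Set.ofList (L.map Prod.snd)).foldl (fun acc c => acc.insert c (pvGset L c))
        (PySem.Dict.empty : PySem.Dict Int (PySem.Set Int))).items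
      = (PySem.Set.ofList (L.map Prod.snd)).map (fun c => (c, pvGset L c)) := by
    have := PySem.Dict.items_foldl_insert_fresh (PySem.Set.ofList (L.map Prod.snd)) (k := fun c => c)
      (v := fun c => pvGset L c) (PySem.Dict.empty : PySem.Dict Int (PySem.Set Int))
      (fun a _ => PySem.Dict.contains_empty a)
      (by rw [show List.map (fun c => c) (PySem.Set.ofList (L.map Prod.snd))
            = PySem.Set.ofList (L.map Prod.snd) from List.map_id' _]
          exact PySem.Set.nodup_ofList _)
    simpa using this
  rw [hBitems, pvFilterPass _ (by
    rw [List.map_map, show (Prod.fst ∘ fun c => (c, pvGset L c)) = id from rfl, List.map_id]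
    exact PySem.Set.nodup_ofList _)]
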